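-- pv_equiv track=rewrite | github.com/chandra122/OrionAiAgent | job_apply/lever.py | _pick_dropdown_option
-- ===== SOURCE A (Python) =====
-- def _pick_dropdown_option(label: str, options: list[str], answers: dict) -> str | None:
--     label = label.lower()
--     clean_opts = [o.strip() for o in options if o.strip() and o.strip().lower() not in ("select", "-- select --", "")]
--     if not clean_opts:
--         return None
--     if any(k in label for k in ["authorized", "eligible", "work in"]):
--         for opt in clean_opts:
--             if "yes" in opt.lower():
--                 return opt
--     if any(k in label for k in ["sponsor", "visa"]):
--         for opt in clean_opts:
--             if "no" in opt.lower():
--                 return opt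
--     if "relocat" in label:
--         for opt in clean_opts:
--             if "no" in opt.lower():
--                 return opt
--     if any(k in label for k in ["hear", "source"]):
--         return clean_opts[0]
--     return None
-- ===== SOURCE B (Python) =====
-- def _pick_dropdown_option(label: str, options: list[str], answers: dict) -> str | None:
--     lbl = label.lower()
--     # single pass: track first clean option, first containing "yes", first containing "no"
--     first_opt = first_yes = first_no = None
--     for o in options:
--         t = o.strip()
--         if not t or t.lower() in ("select", "-- select --", ""):
--             continue
--         if first_opt is None:
--             first_opt = t
--         tl = t.lower()
--         if first_yes is None and "yes" in tl:
--             first_yes = t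
--         if first_no is None and "no" in tl:
--             first_no = t
--     if any(k in lbl for k in ("authorized", "eligible", "work in")) and first_yes is not None:
--         return first_yes
--     if (any(k in lbl for k in ("sponsor", "visa")) or "relocat" in lbl) and first_no is not None:
--         return first_no
--     if any(k in lbl for k in ("hear", "source")):
--         return first_opt
--     return None
-- ===== Notes on version B (the rewrite author's own statement) =====
-- stated objective: alternative
-- what changed: Replaces A's build-clean-list-then-up-to-three-staged-scans structure with a single pass over options that maintains three accumulators (first clean option, first option containing 'yes', first containing 'no'), followed by straight-line label-category checks; the sponsor and relocate branches collapse into one since both pick the first 'no' option.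
import Mathlib
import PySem

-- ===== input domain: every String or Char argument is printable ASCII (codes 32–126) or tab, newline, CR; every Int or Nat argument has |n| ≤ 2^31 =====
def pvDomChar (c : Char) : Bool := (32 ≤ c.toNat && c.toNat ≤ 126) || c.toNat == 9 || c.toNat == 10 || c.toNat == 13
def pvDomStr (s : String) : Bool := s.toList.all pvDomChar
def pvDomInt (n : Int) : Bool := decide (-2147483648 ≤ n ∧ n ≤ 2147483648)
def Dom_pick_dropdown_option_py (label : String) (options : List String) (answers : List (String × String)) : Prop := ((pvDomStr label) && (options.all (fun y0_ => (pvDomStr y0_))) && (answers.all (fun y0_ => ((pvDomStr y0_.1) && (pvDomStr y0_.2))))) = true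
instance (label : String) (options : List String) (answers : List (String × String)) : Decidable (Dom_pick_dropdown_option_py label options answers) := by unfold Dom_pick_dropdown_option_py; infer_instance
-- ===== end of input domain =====

-- B replaces A's clean-list-then-staged-scans with ONE pass over options keeping three
-- accumulators (first clean option, first containing "yes", first containing "no");
-- objective: alternative single-pass decomposition, same cost.

-- ===== PORT A =====
-- A's list comprehension [o.strip() for o in options if ...]
def pvClean (options : List String) : List String :=
  (options.filter (fun o =>
      !(PySem.Str.strip o == "") &&
      !((["select", "-- select --", ""] : List String).contains (PySem.Str.lower (PySem.Str.strip o))))).map PySem.Str.strip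

-- A's 'for opt in clean_opts: if sub in opt.lower(): return opt' loop
def pvFindA (opts : List String) (sub : String) : Option String :=
  match opts with
  | [] => none
  | o :: rest => if PySem.Str.isIn sub (PySem.Str.lower o) then some o else pvFindA rest sub

def pick_dropdown_option_py (label : String) (options : List String) (_answers : List (String × String)) : Option String :=
  let lbl := PySem.Str.lower label
  let clean_opts := pvClean options
  if clean_opts = [] then none
  else
    match (if (["authorized", "eligible", "work in"] : List String).any (fun k => PySem.Str.isIn k lbl)
           then pvFindA clean_opts "yes" else none) with
    | some o => some o
    | none =>
      match (if (["sponsor", "visa"] : List String).any (fun k => PySem.Str.isIn k lbl)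
             then pvFindA clean_opts "no" else none) with
      | some o => some o
      | none =>
        match (if PySem.Str.isIn "relocat" lbl then pvFindA clean_opts "no" else none) with
        | some o => some o
        | none =>
          if (["hear", "source"] : List String).any (fun k => PySem.Str.isIn k lbl)
          then PySem.List.pyGet? clean_opts 0
          else none

-- ===== PORT B =====
-- B's single loop over options; state = (first_opt, first_yes, first_no)
def pvScan (opts : List String) (fo fy fn : Option String) :
    Option String × Option String × Option String :=
  match opts with
  | [] => (fo, fy, fn)
  | o :: rest =>
    let t := PySem.Str.strip o
    if t == "" || (["select", "-- select --", ""] : List String).contains (PySem.Str.lower t) then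
      pvScan rest fo fy fn
    else
      let fo' := if fo.isNone then some t else fo
      let tl := PySem.Str.lower t
      let fy' := if fy.isNone && PySem.Str.isIn "yes" tl then some t else fy
      let fn' := if fn.isNone && PySem.Str.isIn "no" tl then some t else fn
      pvScan rest fo' fy' fn'

def pick_dropdown_option_py_alt (label : String) (options : List String) (_answers : List (String × String)) : Option String :=
  let lbl := PySem.Str.lower label
  let s := pvScan options none none none
  let first_opt := s.1
  let first_yes := s.2.1
  let first_no := s.2.2
  if (["authorized", "eligible", "work in"] : List String).any (fun k => PySem.Str.isIn k lbl)
      && first_yes.isSome then first_yes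
  else if ((["sponsor", "visa"] : List String).any (fun k => PySem.Str.isIn k lbl)
      || PySem.Str.isIn "relocat" lbl) && first_no.isSome then first_no
  else if (["hear", "source"] : List String).any (fun k => PySem.Str.isIn k lbl) then first_opt
  else none

-- ===== PRECONDITION & SPEC =====
def Spec_pick_dropdown_option_py (label : String) (options : List String) (answers : List (String × String)) (out : Option String) : Prop := out = pick_dropdown_option_py_alt label options answers
instance (label : String) (options : List String) (answers : List (String × String)) (out : Option String) : Decidable (Spec_pick_dropdown_option_py label options answers out) := by unfold Spec_pick_dropdown_option_py; infer_instance

-- ===== CLAIM (what is proved, stated in full; the proofs are below) =====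
def Claim_equal_pick_dropdown_option_py : Prop := ∀ (label : String) (options : List String) (answers : List (String × String)), Dom_pick_dropdown_option_py label options answers → Spec_pick_dropdown_option_py label options answers (pick_dropdown_option_py label options answers)

-- ===== LEMMAS AND PROOFS =====
theorem pvScan_eq (opts : List String) (fo fy fn : Option String) :
    pvScan opts fo fy fn =
      (fo.or (pvClean opts).head?,
       fy.or (pvFindA (pvClean opts) "yes"),
       fn.or (pvFindA (pvClean opts) "no")) := by
  induction opts generalizing fo fy fn with
  | nil => simp [pvScan, pvClean, pvFindA]
  | cons o rest ih =>
    rw [pvScan]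
    by_cases h : (PySem.Str.strip o == "" ||
        (["select", "-- select --", ""] : List String).contains (PySem.Str.lower (PySem.Str.strip o))) = true
    · have hp : (!(PySem.Str.strip o == "") &&
          !((["select", "-- select --", ""] : List String).contains (PySem.Str.lower (PySem.Str.strip o)))) = false := by
        rw [← Bool.not_or, h]; rfl
      have hc : pvClean (o :: rest) = pvClean rest := by
        simp only [pvClean, List.filter_cons, hp]; simp
      simp only [h, if_true, ih, hc]
    · simp only [Bool.or_eq_true, not_or, Bool.not_eq_true] at h
      have hb := h
      have hp : (!(PySem.Str.strip o == "") &&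
          !((["select", "-- select --", ""] : List String).contains (PySem.Str.lower (PySem.Str.strip o)))) = true := by
        rw [hb.1, hb.2]; rfl
      have hc : pvClean (o :: rest) = PySem.Str.strip o :: pvClean rest := by
        simp only [pvClean, List.filter_cons, hp]; simp
      rw [if_neg (by rw [hb.1, hb.2]; simp)]
      simp only [ih, hc, Prod.mk.injEq]
      refine ⟨?_, ?_, ?_⟩
      · cases fo <;> simp [Option.or]
      · cases fy with
        | some a => simp [Option.or]
        | none =>
          by_cases hk : PySem.Chars.isIn ['y','e','s'] (PySem.Chars.lower (PySem.Chars.strip o.toList)) = true <;>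
            simp [pvFindA, hk, Option.or]
      · cases fn with
        | some a => simp [Option.or]
        | none =>
          by_cases hk : PySem.Chars.isIn ['n','o'] (PySem.Chars.lower (PySem.Chars.strip o.toList)) = true <;>
            simp [pvFindA, hk, Option.or]

-- ===== VERDICT (by name: the statement is the Claim_ definition above) =====
theorem pick_dropdown_option_py_spec : Claim_equal_pick_dropdown_option_py := by
  intro label options answers _
  unfold Spec_pick_dropdown_option_py pick_dropdown_option_py pick_dropdown_option_py_alt
  rw [pvScan_eq]
  simp only [Option.none_or]
  by_cases hnil : pvClean options = []
  · simp [hnil, pvFindA, List.head?]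
  · simp only [hnil, if_false]
    have hget : PySem.List.pyGet? (pvClean options) 0 = (pvClean options).head? := by
      cases h : pvClean options with
      | nil => simp [PySem.List.pyGet?]
      | cons a l => simp [PySem.List.pyGet?, PySem.List.pyIdx?, List.head?]
    rw [hget]
    cases hy : pvFindA (pvClean options) "yes" <;>
    cases hn : pvFindA (pvClean options) "no" <;>
    split_ifs <;> first | rfl | simp_all
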